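-- pv_equiv track=rewrite | github.com/nsaje/dotfiles | server/dash/export.py | _include_model_ids
-- ===== SOURCE A (Python) =====
-- FIELDNAMES_ID_MAPPING = [('account', 'account_id'),
--                          ('campaign', 'campaign_id'),
--                          ('ad_group', 'ad_group_id'),
--                          # content ad is never a required field, but title is
--                          ('title', 'content_ad_id'),
--                          ('agency', 'agency_id'),
--                          ]
--
-- def _include_model_ids(required_fields):
--     for field, field_id in FIELDNAMES_ID_MAPPING:
--         try:
--             idx = required_fields.index(field)
--             required_fields.insert(idx, field_id)
--         except ValueError:
--             pass
--     return required_fields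
-- ===== SOURCE B (Python) =====
-- FIELDNAMES_ID_MAPPING = [('account', 'account_id'),
--                          ('campaign', 'campaign_id'),
--                          ('ad_group', 'ad_group_id'),
--                          # content ad is never a required field, but title is
--                          ('title', 'content_ad_id'),
--                          ('agency', 'agency_id'),
--                          ]
--
-- def _include_model_ids(required_fields):
--     # Single left-to-right pass: consume the mapping as fields are met, so only
--     # the first occurrence of each mapped field gets its id inserted before it.
--     # Mutates required_fields in place (like the original) and returns it.
--     idmap = dict(FIELDNAMES_ID_MAPPING)
--     out = []
--     for field in required_fields:
--         field_id = idmap.pop(field, None)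
--         if field_id is not None:
--             out.append(field_id)
--         out.append(field)
--     required_fields[:] = out
--     return required_fields
-- ===== Notes on version B (the rewrite author's own statement) =====
-- stated objective: alternative
-- what changed: Replaces the per-mapping-entry .index scan + .insert over the mutating list with a single left-to-right pass that pops a reverse field->id dict while rebuilding the list, written back in place.
import Mathlib
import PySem

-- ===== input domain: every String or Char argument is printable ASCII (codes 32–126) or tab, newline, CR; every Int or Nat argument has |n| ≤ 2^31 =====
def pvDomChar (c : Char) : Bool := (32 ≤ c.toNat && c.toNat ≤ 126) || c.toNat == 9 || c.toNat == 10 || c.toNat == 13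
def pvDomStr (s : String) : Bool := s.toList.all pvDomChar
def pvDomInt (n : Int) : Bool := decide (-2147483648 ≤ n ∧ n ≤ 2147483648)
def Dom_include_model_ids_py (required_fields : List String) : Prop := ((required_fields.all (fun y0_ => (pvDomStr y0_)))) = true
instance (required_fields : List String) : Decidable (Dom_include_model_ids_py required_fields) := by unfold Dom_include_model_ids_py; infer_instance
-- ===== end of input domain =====

-- B replaces A's per-mapping-entry .index scan + .insert with a single pass over the list
-- popping a reverse dict (an alternative, single-traversal formulation; not claimed faster);
-- both mutate the argument in place, equality proved on the return value.

-- module constant FIELDNAMES_ID_MAPPING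
def pvMapping : List (String × String) :=
  [("account", "account_id"), ("campaign", "campaign_id"), ("ad_group", "ad_group_id"),
   ("title", "content_ad_id"), ("agency", "agency_id")]

-- ===== PORT A =====
def include_model_ids_py (required_fields : List String) : List String :=
  pvMapping.foldl (fun acc p =>
    match PySem.List.index? acc p.1 with
    | some idx => PySem.List.insert acc (idx : Int) p.2
    | none => acc) required_fields

-- ===== PORT B =====
-- the loop body of Source B: field_id = idmap.pop(field, None); append id (if any), then field
def pvGoB (idmap : PySem.Dict String String) : List String → List String
  | [] => []
  | x :: xs =>
    match idmap.get? x with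
    | some fid => fid :: x :: pvGoB (idmap.erase x) xs
    | none => x :: pvGoB idmap xs

def include_model_ids_py_alt (required_fields : List String) : List String :=
  pvGoB (PySem.Dict.ofList pvMapping) required_fields

-- ===== PRECONDITION & SPEC =====
def Spec_include_model_ids_py (required_fields : List String) (out : List String) : Prop := out = include_model_ids_py_alt required_fields
instance (required_fields : List String) (out : List String) : Decidable (Spec_include_model_ids_py required_fields out) := by unfold Spec_include_model_ids_py; infer_instance

-- ===== CLAIM (what is proved, stated in full; the proofs are below) =====
def Claim_equal_include_model_ids_py : Prop := ∀ (required_fields : List String), Dom_include_model_ids_py required_fields → Spec_include_model_ids_py required_fields (include_model_ids_py required_fields)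

-- ===== LEMMAS AND PROOFS =====

-- insert the id before the first occurrence of the field (A's step, functionally)
def pvIns1 (f fid : String) : List String → List String
  | [] => []
  | x :: xs => if x = f then fid :: x :: xs else x :: pvIns1 f fid xs

lemma stepA_eq_pvIns1 (f fid : String) (l : List String) :
    (match PySem.List.index? l f with
     | some idx => PySem.List.insert l (idx : Int) fid
     | none => l) = pvIns1 f fid l := by
  induction l with
  | nil => simp [PySem.List.index?, pvIns1]
  | cons x xs ih =>
    by_cases hx : x = f
    · subst hx
      rw [PySem.List.index?_cons_self]
      simp [pvIns1, PySem.List.insert_zero]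
    · rw [PySem.List.index?_cons_of_ne xs hx]
      cases hidx : PySem.List.index? xs f with
      | none =>
        rw [hidx] at ih
        change xs = pvIns1 f fid xs at ih
        simp only [Option.map_none]
        simp [pvIns1, hx, ← ih]
      | some i =>
        obtain ⟨hk, -, -⟩ := PySem.List.getElem_of_index?_eq_some hidx
        rw [hidx] at ih
        change PySem.List.insert xs (↑i) fid = pvIns1 f fid xs at ih
        simp only [Option.map_some]
        rw [PySem.List.insert_natCast _ _ _ (by simp; omega)]
        rw [PySem.List.insert_natCast _ _ _ (le_of_lt hk)] at ih
        simp [pvIns1, hx, ← ih]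

-- A's fold, with each step replaced by pvIns1
def pvF (d : List (String × String)) (l : List String) : List String :=
  d.foldl (fun acc p => pvIns1 p.1 p.2 acc) l

lemma portA_eq_pvF (l : List String) : include_model_ids_py l = pvF pvMapping l := by
  unfold include_model_ids_py pvF
  congr 1
  funext acc p
  exact stepA_eq_pvIns1 p.1 p.2 acc

lemma pvF_nil (d : List (String × String)) : pvF d [] = [] := by
  induction d with
  | nil => rfl
  | cons p d ih => simpa [pvF, List.foldl_cons, pvIns1] using ih

lemma pvIns1_of_ne (f fid x : String) (xs : List String) (h : x ≠ f) :
    pvIns1 f fid (x :: xs) = x :: pvIns1 f fid xs := by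
  simp [pvIns1, h]

lemma pvIns1_cons_self (f fid : String) (xs : List String) :
    pvIns1 f fid (f :: xs) = fid :: f :: xs := by
  simp [pvIns1]

-- the exchange lemma: all of A's insertions applied to (x :: xs) either insert x's id
-- right before x (the first pair keyed x, removed for the tail) or keep x untouched —
-- valid because the mapping's keys are distinct and no id is ever a key
lemma pvF_cons (d : List (String × String)) (x : String) (xs : List String)
    (hnd : (d.map Prod.fst).Nodup)
    (hid : ∀ p ∈ d, ∀ q ∈ d, p.2 ≠ q.1) :
    pvF d (x :: xs) =
      match (d.find? (fun p => p.1 == x)).map Prod.snd with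
      | some fid => fid :: x :: pvF (d.filter (fun p => !(p.1 == x))) xs
      | none => x :: pvF d xs := by
  induction d generalizing x xs with
  | nil => simp [pvF]
  | cons p d ih =>
    have hnd' : (d.map Prod.fst).Nodup := (List.nodup_cons.mp hnd).2
    have hp1 : p.1 ∉ d.map Prod.fst := (List.nodup_cons.mp hnd).1
    have hid' : ∀ a ∈ d, ∀ b ∈ d, a.2 ≠ b.1 := fun a ha b hb =>
      hid a (List.mem_cons_of_mem _ ha) b (List.mem_cons_of_mem _ hb)
    have hstep : ∀ t : List String, pvF (p :: d) t = pvF d (pvIns1 p.1 p.2 t) := by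
      intro t; simp [pvF, List.foldl_cons]
    by_cases hx : p.1 = x
    · -- head pair matches: the first insertion fires right at the head
      subst hx
      have h2 : p.2 ∉ d.map Prod.fst := by
        intro hmem
        obtain ⟨q, hq, hq1⟩ := List.mem_map.mp hmem
        exact hid p List.mem_cons_self q (List.mem_cons_of_mem _ hq) hq1.symm
      have hf2 : d.find? (fun q => q.1 == p.2) = none := by
        rw [List.find?_eq_none]; intro q hq hbeq
        exact h2 (List.mem_map.mpr ⟨q, hq, eq_of_beq hbeq⟩)
      have hf1 : d.find? (fun q => q.1 == p.1) = none := by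
        rw [List.find?_eq_none]; intro q hq hbeq
        exact hp1 (List.mem_map.mpr ⟨q, hq, eq_of_beq hbeq⟩)
      have hfilter : d.filter (fun q => !(q.1 == p.1)) = d := by
        apply List.filter_eq_self.mpr
        intro q hq
        simp only [Bool.not_eq_eq_eq_not, Bool.not_true, beq_eq_false_iff_ne]
        exact fun h => hp1 (List.mem_map.mpr ⟨q, hq, h⟩)
      rw [hstep, pvIns1_cons_self]
      rw [ih p.2 (p.1 :: xs) hnd' hid', hf2]
      simp only [Option.map_none]
      rw [ih p.1 xs hnd' hid', hf1]
      simp [hfilter]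
    · -- head pair keyed differently from x: it commutes with the head cons
      have hne : x ≠ p.1 := fun h => hx h.symm
      rw [hstep, pvIns1_of_ne _ _ _ _ hne, ih x (pvIns1 p.1 p.2 xs) hnd' hid']
      have hxbeq : (p.1 == x) = false := beq_eq_false_iff_ne.mpr hx
      cases hcase : (d.find? (fun q => q.1 == x)).map Prod.snd with
      | none =>
        simp only [hcase, List.find?_cons, hxbeq]
        cases hfind : d.find? (fun q => q.1 == x) with
        | none => simp [hstep]
        | some q => rw [hfind] at hcase; simp at hcase
      | some fid =>
        simp only [hcase, List.find?_cons, hxbeq, List.filter_cons,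
          Bool.not_false]
        cases hfind : d.find? (fun q => q.1 == x) with
        | none => rw [hfind] at hcase; simp at hcase
        | some q =>
          rw [hfind] at hcase
          simp only [Option.map_some, Option.some.injEq] at hcase
          subst hcase
          exact congrArg _ (congrArg _ (by simp [pvF, List.foldl_cons]))

-- B's one-pass loop over an explicit pair list equals A's fold
lemma pvF_eq_pvGoB (l : List String) (d : List (String × String))
    (hnd : (d.map Prod.fst).Nodup)
    (hid : ∀ p ∈ d, ∀ q ∈ d, p.2 ≠ q.1) :
    pvF d l = pvGoB (PySem.Dict.mk d) l := by
  induction l generalizing d with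
  | nil => simp [pvF_nil, pvGoB]
  | cons x xs ih =>
    rw [pvF_cons d x xs hnd hid]
    have hget : (PySem.Dict.mk d).get? x = (d.find? (fun p => p.1 == x)).map Prod.snd := rfl
    have herase : (PySem.Dict.mk d).erase x = PySem.Dict.mk (d.filter (fun p => !(p.1 == x))) := rfl
    cases hcase : (d.find? (fun p => p.1 == x)).map Prod.snd with
    | none => simp only [hcase, pvGoB, hget]; rw [ih d hnd hid]
    | some fid =>
      simp only [hcase, pvGoB, hget, herase]
      have hsub : List.Sublist (d.filter (fun p => !(p.1 == x))) d := List.filter_sublist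
      refine congrArg _ (congrArg _ (ih _ ?_ ?_))
      · exact (hsub.map Prod.fst).nodup hnd
      · exact fun a ha b hb => hid a (hsub.subset ha) b (hsub.subset hb)

-- ===== VERDICT (by name: the statement is the Claim_ definition above) =====
theorem include_model_ids_py_spec : Claim_equal_include_model_ids_py := by
  intro required_fields _
  unfold Spec_include_model_ids_py include_model_ids_py_alt
  rw [portA_eq_pvF]
  have hof : PySem.Dict.ofList pvMapping = PySem.Dict.mk pvMapping := by decide
  rw [hof]
  exact pvF_eq_pvGoB required_fields pvMapping (by decide) (by decide)
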